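-- pv_equiv track=rewrite | github.com/brianmcentire/alexa-guestworld | scrapers/challenge_scraper_handler.py | _is_regression_against_existing
-- ===== SOURCE A (Python) =====
-- def _extract_month_keys(payload):
--     """Return sorted valid month keys present in challenge payload JSON."""
--     if not isinstance(payload, dict):
--         return []
--
--     keys = []
--     for key, value in payload.items():
--         if not isinstance(value, dict):
--             continue
--         if len(key) == 7 and key[4] == "-" and key[:4].isdigit() and key[5:7].isdigit():
--             month_num = int(key[5:7])
--             if 1 <= month_num <= 12:
--                 keys.append(key)
--     return sorted(set(keys))
--
-- def _is_regression_against_existing(existing_payload, new_payload):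
--     """True when new payload would lose recent months or day coverage.
--
--     Old months that precede the new payload's earliest month are allowed to
--     roll off — that is normal forward progress.  But dropping a month that
--     is at or after the new payload's earliest month (e.g. a next-month
--     entry the existing file already had) is a regression.  Likewise, fewer
--     days within any shared month is a regression.
--     """
--     existing_months = set(_extract_month_keys(existing_payload))
--     new_months = set(_extract_month_keys(new_payload))
--     if not new_months:
--         return (len(existing_months) > 0), sorted(existing_months)
--
--     earliest_new = min(new_months)
--     regressed = []
--
--     # Check for existing months at/after the new range that would be lost
--     for month in sorted(existing_months - new_months):
--         if month >= earliest_new: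
--             regressed.append(month)
--
--     # Check for fewer days within shared months
--     for month in sorted(existing_months & new_months):
--         if len(new_payload[month]) < len(existing_payload[month]):
--             regressed.append(month)
--
--     return (len(regressed) > 0), sorted(regressed)
-- ===== SOURCE B (Python) =====
-- def _is_regression_against_existing(existing_payload, new_payload):
--     """Two-pointer merge over the two sorted month lists: membership and
--     month classification are decided by the merge comparison itself, with
--     no set difference/intersection passes and no final re-sort."""
--     existing = _sorted_month_keys(existing_payload)
--     new = _sorted_month_keys(new_payload)
--     if not new:
--         return (len(existing) > 0), existing
--
--     first_new = new[0]
--     regressed = []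
--     E, N = existing, new
--     while E:
--         m = E[0]
--         if N and N[0] < m:
--             N = N[1:]
--         elif N and N[0] == m:
--             if len(new_payload[m]) < len(existing_payload[m]):
--                 regressed.append(m)
--             E, N = E[1:], N[1:]
--         else:
--             if m >= first_new:
--                 regressed.append(m)
--             E = E[1:]
--     return (len(regressed) > 0), regressed
--
--
-- def _sorted_month_keys(payload):
--     if not isinstance(payload, dict):
--         return []
--     return sorted({key for key, value in payload.items()
--                    if isinstance(value, dict)
--                    and len(key) == 7 and key[4] == "-"
--                    and key[:4].isdigit() and key[5:7].isdigit()
--                    and 1 <= int(key[5:7]) <= 12})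
-- ===== Notes on version B (the rewrite author's own statement) =====
-- stated objective: alternative
-- what changed: B replaces A's set difference/intersection and per-month membership tests by a two-pointer merge of the two sorted month lists: a single while loop advances a pointer into the sorted new months, classifying each existing month by the merge comparison (equal head = shared month, day-count check; passed head = dropped month, boundary check against new[0]), producing the regressed list already sorted with no sets and no final sort.
import Mathlib
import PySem

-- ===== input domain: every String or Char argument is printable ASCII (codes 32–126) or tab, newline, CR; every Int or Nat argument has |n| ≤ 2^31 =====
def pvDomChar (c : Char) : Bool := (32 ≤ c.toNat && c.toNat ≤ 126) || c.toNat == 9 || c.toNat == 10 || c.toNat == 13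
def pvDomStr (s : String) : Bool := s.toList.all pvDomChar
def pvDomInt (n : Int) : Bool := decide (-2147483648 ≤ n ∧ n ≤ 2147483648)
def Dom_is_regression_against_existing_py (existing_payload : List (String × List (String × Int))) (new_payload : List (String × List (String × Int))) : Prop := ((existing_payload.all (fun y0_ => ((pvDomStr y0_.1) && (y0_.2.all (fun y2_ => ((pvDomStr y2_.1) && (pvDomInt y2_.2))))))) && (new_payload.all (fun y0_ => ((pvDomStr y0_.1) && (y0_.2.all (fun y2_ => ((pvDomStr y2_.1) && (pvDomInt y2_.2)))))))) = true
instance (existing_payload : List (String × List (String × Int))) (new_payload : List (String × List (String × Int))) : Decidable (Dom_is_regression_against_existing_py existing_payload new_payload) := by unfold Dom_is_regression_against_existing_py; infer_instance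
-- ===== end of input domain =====

-- B replaces A's set difference/intersection passes by a two-pointer merge of the two
-- sorted month lists: one while loop classifies each existing month by the merge
-- comparison, producing the regressed list already sorted (objective: alternative).

-- ===== PORT A =====
-- On the typed domain (dicts of dicts) both isinstance checks of A are always true.
def extractMonthKeysA (payload : List (String × List (String × Int))) : List String :=
  let keys := payload.foldl (fun acc kv =>
    if PySem.Str.len kv.1 == 7 && PySem.Str.pyGet? kv.1 4 == some '-'
       && PySem.Str.strIsdigit (PySem.Str.slice kv.1 none (some 4))
       && PySem.Str.strIsdigit (PySem.Str.slice kv.1 (some 5) (some 7)) then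
      -- int(key[5:7]); the default 0 is unreachable (guarded by isdigit)
      let month_num := (PySem.Int.ofStr? (PySem.Str.slice kv.1 (some 5) (some 7))).getD 0
      if 1 ≤ month_num ∧ month_num ≤ 12 then acc ++ [kv.1] else acc
    else acc) []
  PySem.List.sorted (PySem.Set.ofList keys) (fun x => x) false

def is_regression_against_existing_py (existing_payload : List (String × List (String × Int))) (new_payload : List (String × List (String × Int))) : Bool × List String :=
  let existing_months := PySem.Set.ofList (extractMonthKeysA existing_payload)
  let new_months := PySem.Set.ofList (extractMonthKeysA new_payload)
  if new_months.isEmpty then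
    (decide (0 < PySem.Set.len existing_months), PySem.List.sorted existing_months (fun x => x) false)
  else
    -- min(new_months); default "" unreachable (new_months nonempty here)
    let earliest_new := (PySem.List.min? new_months (fun x => x)).getD ""
    let regressed := (PySem.List.sorted (PySem.Set.diff existing_months new_months) (fun x => x) false).foldl
      (fun acc month => if decide (earliest_new ≤ month) then acc ++ [month] else acc) []
    let regressed2 := (PySem.List.sorted (PySem.Set.inter existing_months new_months) (fun x => x) false).foldl
      (fun acc month =>
        if decide (((PySem.Dict.mk new_payload).getD month []).length
                   < ((PySem.Dict.mk existing_payload).getD month []).length)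
        then acc ++ [month] else acc) regressed
    (decide (0 < regressed2.length), PySem.List.sorted regressed2 (fun x => x) false)

-- ===== PORT B =====
-- sorted({key for key, value in payload.items() if <valid month key>})
def sortedMonthKeysB (payload : List (String × List (String × Int))) : List String :=
  PySem.List.sorted
    (PySem.Set.ofList ((payload.filter (fun kv =>
      PySem.Str.len kv.1 == 7 && PySem.Str.pyGet? kv.1 4 == some '-'
      && PySem.Str.strIsdigit (PySem.Str.slice kv.1 none (some 4))
      && PySem.Str.strIsdigit (PySem.Str.slice kv.1 (some 5) (some 7))
      && decide (1 ≤ (PySem.Int.ofStr? (PySem.Str.slice kv.1 (some 5) (some 7))).getD 0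
                 ∧ (PySem.Int.ofStr? (PySem.Str.slice kv.1 (some 5) (some 7))).getD 0 ≤ 12))).map (·.1)))
    (fun x => x) false

-- the while loop of B: two-pointer merge over the sorted existing/new month lists
def classifyB (existing_payload new_payload : List (String × List (String × Int))) (firstNew : String) :
    List String → List String → List String → List String
  | [], _, acc => acc
  | m :: E', [], acc =>
      classifyB existing_payload new_payload firstNew E' []
        (if firstNew ≤ m then acc ++ [m] else acc)
  | m :: E', nh :: N', acc =>
      if nh < m then
        classifyB existing_payload new_payload firstNew (m :: E') N' acc
      else if nh = m then
        classifyB existing_payload new_payload firstNew E' N'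
          (if ((PySem.Dict.mk new_payload).getD m []).length
              < ((PySem.Dict.mk existing_payload).getD m []).length
           then acc ++ [m] else acc)
      else
        classifyB existing_payload new_payload firstNew E' (nh :: N')
          (if firstNew ≤ m then acc ++ [m] else acc)
termination_by E N _ => E.length + N.length

def is_regression_against_existing_py_alt (existing_payload : List (String × List (String × Int))) (new_payload : List (String × List (String × Int))) : Bool × List String :=
  let existing := sortedMonthKeysB existing_payload
  let newL := sortedMonthKeysB new_payload
  if newL.isEmpty then
    (decide (0 < existing.length), existing)
  else
    -- new[0]; default "" unreachable (newL nonempty here)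
    let firstNew := newL.headD ""
    let regressed := classifyB existing_payload new_payload firstNew existing newL []
    (decide (0 < regressed.length), regressed)

-- ===== PRECONDITION & SPEC =====
def Spec_is_regression_against_existing_py (existing_payload : List (String × List (String × Int))) (new_payload : List (String × List (String × Int))) (out : Bool × List String) : Prop := out = is_regression_against_existing_py_alt existing_payload new_payload
instance (existing_payload : List (String × List (String × Int))) (new_payload : List (String × List (String × Int))) (out : Bool × List String) : Decidable (Spec_is_regression_against_existing_py existing_payload new_payload out) := by unfold Spec_is_regression_against_existing_py; infer_instance

-- ===== CLAIM (what is proved, stated in full; the proofs are below) =====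
def Claim_equal_is_regression_against_existing_py : Prop := ∀ (existing_payload : List (String × List (String × Int))) (new_payload : List (String × List (String × Int))), Dom_is_regression_against_existing_py existing_payload new_payload → Spec_is_regression_against_existing_py existing_payload new_payload (is_regression_against_existing_py existing_payload new_payload)

-- ===== LEMMAS AND PROOFS =====

-- the shared validity test, as one Bool
def pvValid (k : String) : Bool :=
  PySem.Str.len k == 7 && PySem.Str.pyGet? k 4 == some '-'
  && PySem.Str.strIsdigit (PySem.Str.slice k none (some 4))
  && PySem.Str.strIsdigit (PySem.Str.slice k (some 5) (some 7))
  && decide (1 ≤ (PySem.Int.ofStr? (PySem.Str.slice k (some 5) (some 7))).getD 0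
             ∧ (PySem.Int.ofStr? (PySem.Str.slice k (some 5) (some 7))).getD 0 ≤ 12)

def pvKeys (payload : List (String × List (String × Int))) : List String :=
  (payload.filter (fun kv => pvValid kv.1)).map (·.1)

-- the sorted month list both programs work over, and the common closed form of the result
def pvMonths (payload : List (String × List (String × Int))) : List String :=
  PySem.List.sorted (PySem.Set.ofList (pvKeys payload)) (fun x => x) false

def pvPred (e n : List (String × List (String × Int))) (m : String) : Bool :=
  if (PySem.Set.ofList (pvKeys n)).contains m then
    decide (((PySem.Dict.mk n).getD m []).length < ((PySem.Dict.mk e).getD m []).length)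
  else
    decide ((PySem.List.min? (PySem.Set.ofList (pvKeys n)) (fun x => x)).getD "" ≤ m)

def pvResult (e n : List (String × List (String × Int))) : Bool × List String :=
  if (PySem.Set.ofList (pvKeys n)).isEmpty then
    (decide (0 < (pvMonths e).length), pvMonths e)
  else
    ((decide (0 < ((pvMonths e).filter (pvPred e n)).length), (pvMonths e).filter (pvPred e n)))

theorem pv_if_if_and {α : Type} (c : Bool) (P : Prop) [Decidable P] (a b : α) :
    (if c then (if P then a else b) else b) = if c && decide P then a else b := by
  cases c <;> by_cases h : P <;> simp [h]

theorem pv_fold_keys (payload : List (String × List (String × Int))) :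
    payload.foldl (fun acc kv => if pvValid kv.1 = true then acc ++ [kv.1] else acc) []
      = pvKeys payload := by
  have h := PySem.List.foldl_append_if (l := payload) (acc := ([] : List String))
    (p := fun kv : String × List (String × Int) => pvValid kv.1) (f := fun kv => kv.1)
  unfold pvKeys
  simpa using h

theorem extractA_eq (payload : List (String × List (String × Int))) :
    extractMonthKeysA payload = pvMonths payload := by
  unfold extractMonthKeysA pvMonths
  have h := PySem.List.foldl_congr_mem
    (l := payload) (init := ([] : List String))
    (f := fun acc kv =>
      if PySem.Str.len kv.1 == 7 && PySem.Str.pyGet? kv.1 4 == some '-'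
         && PySem.Str.strIsdigit (PySem.Str.slice kv.1 none (some 4))
         && PySem.Str.strIsdigit (PySem.Str.slice kv.1 (some 5) (some 7)) then
        let month_num := (PySem.Int.ofStr? (PySem.Str.slice kv.1 (some 5) (some 7))).getD 0
        if 1 ≤ month_num ∧ month_num ≤ 12 then acc ++ [kv.1] else acc
      else acc)
    (g := fun acc kv => if pvValid kv.1 = true then acc ++ [kv.1] else acc)
    (by intro acc kv _
        show (if _ then (if _ then _ else _) else _) = _
        rw [pv_if_if_and]
        rfl)
  dsimp only
  rw [h, pv_fold_keys]

theorem sortedMonthKeysB_eq (payload : List (String × List (String × Int))) :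
    sortedMonthKeysB payload = pvMonths payload := rfl

theorem pv_nodup_sorted (l : List String) (h : l.Nodup) :
    (PySem.List.sorted l (fun x => x) false).Nodup :=
  (PySem.List.sorted_perm l (fun x => x) false).symm.nodup h

theorem ofList_sorted (ks : List String) :
    PySem.Set.ofList (PySem.List.sorted (PySem.Set.ofList ks) (fun x => x) false)
      = PySem.List.sorted (PySem.Set.ofList ks) (fun x => x) false :=
  PySem.Set.ofList_eq_self_of_nodup _ (pv_nodup_sorted _ (PySem.Set.nodup_ofList ks))

theorem isEmpty_sorted (l : List String) :
    (PySem.List.sorted l (fun x => x) false).isEmpty = l.isEmpty := by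
  rcases h : l.isEmpty with _ | _
  · simp_all [List.isEmpty_eq_false_iff, PySem.List.sorted_eq_nil_iff]
  · simp_all [List.isEmpty_iff, PySem.List.sorted_eq_nil_iff]

theorem min?_sorted_id (xs : List String) :
    PySem.List.min? (PySem.List.sorted xs (fun x => x) false) (fun x => x)
      = PySem.List.min? xs (fun x => x) := by
  rcases h1 : PySem.List.min? (PySem.List.sorted xs (fun x => x) false) (fun x => x) with _ | m1
  · rw [PySem.List.min?_eq_none_iff, PySem.List.sorted_eq_nil_iff] at h1
    rw [eq_comm, PySem.List.min?_eq_none_iff]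
    exact h1
  · rcases h2 : PySem.List.min? xs (fun x => x) with _ | m2
    · exfalso
      rw [PySem.List.min?_eq_none_iff] at h2
      subst h2
      have hs : PySem.List.sorted ([] : List String) (fun x => x) false = [] :=
        (PySem.List.sorted_eq_nil_iff _ _ _).mpr rfl
      rw [hs] at h1
      have hn : PySem.List.min? ([] : List String) (fun x => x) = none :=
        (PySem.List.min?_eq_none_iff _ _).mpr rfl
      rw [hn] at h1
      simp at h1
    · have hm1 : m1 ∈ xs := (PySem.List.mem_sorted _ _ _ _).mp (PySem.List.min?_mem h1)
      have hm2 : m2 ∈ PySem.List.sorted xs (fun x => x) false :=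
        (PySem.List.mem_sorted _ _ _ _).mpr (PySem.List.min?_mem h2)
      have e1 := PySem.List.min?_isMin h1 m2 hm2
      have e2 := PySem.List.min?_isMin h2 m1 hm1
      simp only [Option.some.injEq]
      exact le_antisymm e1 e2

theorem head?_sorted_min (l : List String) :
    (PySem.List.sorted l (fun x => x) false).head? = PySem.List.min? l (fun x => x) := by
  rcases hs : PySem.List.sorted l (fun x => x) false with _ | ⟨m, t⟩
  · rw [PySem.List.sorted_eq_nil_iff] at hs
    subst hs
    have hn : PySem.List.min? ([] : List String) (fun x => x) = none :=
      (PySem.List.min?_eq_none_iff _ _).mpr rfl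
    simp [hn]
  · have hm : m ∈ l := (PySem.List.mem_sorted _ _ _ _).mp (by rw [hs]; exact List.mem_cons_self ..)
    have hle := PySem.List.key_head_sorted_le l (fun x => x) hs
    rcases h2 : PySem.List.min? l (fun x => x) with _ | m2
    · rw [PySem.List.min?_eq_none_iff] at h2
      subst h2
      simp at hm
    · have hm2 : m2 ∈ l := PySem.List.min?_mem h2
      have e1 : m ≤ m2 := hle m2 hm2
      have e2 : m2 ≤ m := PySem.List.min?_isMin h2 m hm
      simp only [List.head?_cons, Option.some.injEq]
      exact le_antisymm e1 e2

theorem pairwise_lt_filter (ks : List String) (p : String → Bool) :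
    ((PySem.List.sorted (PySem.Set.ofList ks) (fun x => x) false).filter p).Pairwise (· < ·) :=
  List.Pairwise.filter p (PySem.List.sorted_ofList_pairwise_lt ks)

theorem sorted_sub_eq (ks : List String) (s : List String) (p : String → Bool)
    (hs : s.Nodup)
    (hmem : ∀ x, x ∈ s ↔ x ∈ PySem.List.sorted (PySem.Set.ofList ks) (fun x => x) false ∧ p x = true) :
    PySem.List.sorted s (fun x => x) false
      = (PySem.List.sorted (PySem.Set.ofList ks) (fun x => x) false).filter p := by
  apply PySem.List.sorted_eq_of_perm_of_pairwise_lt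
  · rw [List.perm_ext_iff_of_nodup (List.Nodup.filter p
        (pv_nodup_sorted _ (PySem.Set.nodup_ofList ks))) hs]
    intro a
    rw [List.mem_filter, hmem]
  · exact pairwise_lt_filter ks p

theorem filter_or_disjoint_perm {α : Type} (p q : α → Bool) (xs : List α)
    (h : ∀ x, p x = true → q x = false) :
    (xs.filter (fun x => p x || q x)).Perm (xs.filter p ++ xs.filter q) := by
  induction xs with
  | nil => simp
  | cons x xs ih =>
    rcases hp : p x with _ | _
    · rcases hq : q x with _ | _
      · simpa [hp, hq] using ih
      · simp only [List.filter_cons, hp, hq]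
        simpa using (ih.cons x).trans List.perm_middle.symm
    · have hq : q x = false := h x hp
      simp only [List.filter_cons, hp, hq]
      simpa using ih.cons x

theorem pv_close (E R : List String) (pB : String → Bool)
    (hperm : (E.filter pB).Perm R)
    (hpw : (E.filter pB).Pairwise (· < ·)) :
    (decide (0 < R.length), PySem.List.sorted R (fun x => x) false)
      = (decide (0 < (E.filter pB).length), E.filter pB) := by
  have hs := PySem.List.sorted_eq_of_perm_of_pairwise_lt R (E.filter pB) (fun x => x) hperm hpw
  rw [hs, hperm.length_eq]

-- A's two staged loops compute the common closed form
theorem A_closed (e n : List (String × List (String × Int))) :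
    is_regression_against_existing_py e n = pvResult e n := by
  unfold is_regression_against_existing_py pvResult
  simp only [extractA_eq]
  unfold pvMonths
  simp only [ofList_sorted, isEmpty_sorted, min?_sorted_id,
    PySem.List.length_sorted, PySem.List.sorted_sorted, PySem.Set.len]
  rcases hN : List.isEmpty (PySem.Set.ofList (pvKeys n)) with _ | _
  · -- new_months nonempty: the regression scan
    simp only [Bool.false_eq_true, if_false]
    have hdiff := sorted_sub_eq (pvKeys e)
      (PySem.Set.diff (PySem.List.sorted (PySem.Set.ofList (pvKeys e)) (fun x => x) false)
        (PySem.List.sorted (PySem.Set.ofList (pvKeys n)) (fun x => x) false))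
      (fun x => !(PySem.Set.ofList (pvKeys n)).contains x)
      (PySem.Set.nodup_diff _ _ (pv_nodup_sorted _ (PySem.Set.nodup_ofList _)))
      (by intro x
          simp [PySem.Set.mem_diff, PySem.List.mem_sorted])
    have hinter := sorted_sub_eq (pvKeys e)
      (PySem.Set.inter (PySem.List.sorted (PySem.Set.ofList (pvKeys e)) (fun x => x) false)
        (PySem.List.sorted (PySem.Set.ofList (pvKeys n)) (fun x => x) false))
      (fun x => (PySem.Set.ofList (pvKeys n)).contains x)
      (PySem.Set.nodup_inter _ _ (pv_nodup_sorted _ (PySem.Set.nodup_ofList _)))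
      (by intro x
          simp [PySem.Set.mem_inter, PySem.List.mem_sorted])
    rw [hdiff, hinter]
    have hreg1 := PySem.List.foldl_append_if_eq_filter
      (fun month => decide ((PySem.List.min? (PySem.Set.ofList (pvKeys n)) (fun x => x)).getD "" ≤ month))
      ((PySem.List.sorted (PySem.Set.ofList (pvKeys e)) (fun x => x) false).filter
        (fun x => !(PySem.Set.ofList (pvKeys n)).contains x)) []
    have hreg2 := PySem.List.foldl_append_if_eq_filter
      (fun month => decide (((PySem.Dict.mk n).getD month []).length < ((PySem.Dict.mk e).getD month []).length))
      ((PySem.List.sorted (PySem.Set.ofList (pvKeys e)) (fun x => x) false).filter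
        (fun x => (PySem.Set.ofList (pvKeys n)).contains x))
    simp only [hreg1, List.nil_append, hreg2, List.filter_filter]
    have hB : ((PySem.List.sorted (PySem.Set.ofList (pvKeys e)) (fun x => x) false).filter (pvPred e n))
        = ((PySem.List.sorted (PySem.Set.ofList (pvKeys e)) (fun x => x) false).filter
        (fun month =>
          (decide ((PySem.List.min? (PySem.Set.ofList (pvKeys n)) (fun x => x)).getD "" ≤ month)
            && !(PySem.Set.ofList (pvKeys n)).contains month)
          || (decide (((PySem.Dict.mk n).getD month []).length < ((PySem.Dict.mk e).getD month []).length)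
            && (PySem.Set.ofList (pvKeys n)).contains month))) := by
      apply List.filter_congr
      intro x _
      unfold pvPred
      rcases hc : (PySem.Set.ofList (pvKeys n)).contains x with _ | _ <;> simp
    rw [hB]
    have hperm := filter_or_disjoint_perm
      (fun month =>
        decide ((PySem.List.min? (PySem.Set.ofList (pvKeys n)) (fun x => x)).getD "" ≤ month)
          && !(PySem.Set.ofList (pvKeys n)).contains month)
      (fun month =>
        decide (((PySem.Dict.mk n).getD month []).length < ((PySem.Dict.mk e).getD month []).length)
          && (PySem.Set.ofList (pvKeys n)).contains month)
      (PySem.List.sorted (PySem.Set.ofList (pvKeys e)) (fun x => x) false)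
      (by intro x hx
          rcases hc : (PySem.Set.ofList (pvKeys n)).contains x with _ | _ <;> simp_all)
    exact pv_close _ _ _ hperm (pairwise_lt_filter _ _)
  · -- new_months empty: both return the sorted existing months
    simp

-- the merge loop computes a filter over the sorted existing months
theorem classify_eq (ep np : List (String × List (String × Int))) (firstNew : String)
    (Nfull : List String) (E N acc : List String)
    (hE : E.Pairwise (· < ·)) (hN : N.Pairwise (· < ·))
    (hinv : ∀ m ∈ E, (m ∈ Nfull ↔ m ∈ N)) :
    classifyB ep np firstNew E N acc
      = acc ++ E.filter (fun m => if m ∈ Nfull then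
          decide (((PySem.Dict.mk np).getD m []).length < ((PySem.Dict.mk ep).getD m []).length)
        else decide (firstNew ≤ m)) := by
  match E, N with
  | [], N => simp [classifyB]
  | m :: E', [] =>
    have hm : m ∉ Nfull := by simpa using (hinv m (List.mem_cons_self ..))
    rw [classifyB, classify_eq ep np firstNew Nfull E' [] _ hE.tail (by simp)
      (fun x hx => by simpa using (hinv x (List.mem_cons_of_mem _ hx)))]
    by_cases h : firstNew ≤ m
    · simp [hm, h, String.le_iff_toList_le.mp h]
    · simp [hm, h, String.lt_iff_toList_lt.mp (not_le.mp h)]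
  | m :: E', nh :: N' =>
    have hmlt : ∀ x ∈ E', m < x := fun x hx => List.rel_of_pairwise_cons hE hx
    by_cases h1 : nh < m
    · rw [classifyB, if_pos h1, classify_eq ep np firstNew Nfull (m :: E') N' acc hE hN.tail
        (by intro x hx
            have hxm : m ≤ x := by
              rcases hx with _ | hx'
              · exact le_refl _
              · exact le_of_lt (hmlt x (by assumption))
            have hne : x ≠ nh := by
              intro he; rw [he] at hxm; exact absurd (lt_of_lt_of_le h1 hxm) (lt_irrefl nh)
            rw [hinv x hx]
            simp [List.mem_cons, hne])]
    · by_cases h2 : nh = m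
      · subst h2
        have hm : nh ∈ Nfull := (hinv nh (List.mem_cons_self ..)).mpr (List.mem_cons_self ..)
        rw [classifyB, if_neg h1, if_pos rfl, classify_eq ep np firstNew Nfull E' N' _
          (hE.tail) (hN.tail)
          (by intro x hx
              have hne : x ≠ nh := ne_of_gt (hmlt x hx)
              rw [hinv x (List.mem_cons_of_mem _ hx)]
              simp [List.mem_cons, hne])]
        by_cases hd : ((PySem.Dict.mk np).getD nh []).length < ((PySem.Dict.mk ep).getD nh []).length
          <;> simp [hm, hd]
      · have h3 : m < nh := by
          rcases lt_trichotomy nh m with h | h | h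
          · exact absurd h h1
          · exact absurd h h2
          · exact h
        have hm : m ∉ Nfull := by
          rw [hinv m (List.mem_cons_self ..)]
          intro hmem
          rw [List.mem_cons] at hmem
          rcases hmem with he | hmem'
          · exact h2 he.symm
          · exact absurd (List.rel_of_pairwise_cons hN hmem') (not_lt_of_gt h3)
        rw [classifyB, if_neg h1, if_neg h2, classify_eq ep np firstNew Nfull E' (nh :: N') _
          hE.tail hN (fun x hx => hinv x (List.mem_cons_of_mem _ hx))]
        by_cases h : firstNew ≤ m
        · simp [hm, h, String.le_iff_toList_le.mp h]
        · simp [hm, h, String.lt_iff_toList_lt.mp (not_le.mp h)]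
termination_by E.length + N.length

-- B computes the common closed form
theorem B_closed (e n : List (String × List (String × Int))) :
    is_regression_against_existing_py_alt e n = pvResult e n := by
  simp only [is_regression_against_existing_py_alt, sortedMonthKeysB_eq]
  unfold pvResult pvMonths
  simp only [isEmpty_sorted]
  rcases hN : List.isEmpty (PySem.Set.ofList (pvKeys n)) with _ | _
  · simp only [Bool.false_eq_true, if_false]
    have hG := classify_eq e n
      ((PySem.List.sorted (PySem.Set.ofList (pvKeys n)) (fun x => x) false).headD "")
      (PySem.List.sorted (PySem.Set.ofList (pvKeys n)) (fun x => x) false)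
      (PySem.List.sorted (PySem.Set.ofList (pvKeys e)) (fun x => x) false)
      (PySem.List.sorted (PySem.Set.ofList (pvKeys n)) (fun x => x) false) []
      (PySem.List.sorted_ofList_pairwise_lt _) (PySem.List.sorted_ofList_pairwise_lt _)
      (fun _ _ => Iff.rfl)
    rw [List.nil_append] at hG
    have hpred : ((PySem.List.sorted (PySem.Set.ofList (pvKeys e)) (fun x => x) false).filter
        (fun m => if m ∈ PySem.List.sorted (PySem.Set.ofList (pvKeys n)) (fun x => x) false then
          decide (((PySem.Dict.mk n).getD m []).length < ((PySem.Dict.mk e).getD m []).length)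
        else decide ((PySem.List.sorted (PySem.Set.ofList (pvKeys n)) (fun x => x) false).headD "" ≤ m)))
        = ((PySem.List.sorted (PySem.Set.ofList (pvKeys e)) (fun x => x) false).filter (pvPred e n)) := by
      apply List.filter_congr
      intro x _
      unfold pvPred
      have hc : (PySem.Set.ofList (pvKeys n)).contains x
          = decide (x ∈ PySem.List.sorted (PySem.Set.ofList (pvKeys n)) (fun x => x) false) := by
        simp [PySem.List.mem_sorted]
      have hh : (PySem.List.sorted (PySem.Set.ofList (pvKeys n)) (fun x => x) false).headD ""
          = (PySem.List.min? (PySem.Set.ofList (pvKeys n)) (fun x => x)).getD "" := by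
        rw [List.headD_eq_head?_getD, head?_sorted_min]
      rw [hh, hc]
      by_cases hx : x ∈ PySem.List.sorted (PySem.Set.ofList (pvKeys n)) (fun x => x) false
        <;> simp [hx]
    rw [hpred] at hG
    simp only [hG]
  · simp

-- ===== VERDICT (by name: the statement is the Claim_ definition above) =====
theorem is_regression_against_existing_py_spec : Claim_equal_is_regression_against_existing_py := by
  intro e n _
  unfold Spec_is_regression_against_existing_py
  rw [A_closed, B_closed]
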